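-- pv_equiv track=rewrite | github.com/Sumedha494/DSA-Questions | sum_of_zeroes.py | move_zeroes_to_start
-- ===== SOURCE A (Python) =====
-- def move_zeroes_to_start(arr):
--     """Move all zeroes to start"""
--     arr = arr.copy()
--     non_zero_idx = len(arr) - 1
--
--     for i in range(len(arr) - 1, -1, -1):
--         if arr[i] != 0:
--             arr[non_zero_idx] = arr[i]
--             non_zero_idx -= 1
--
--     while non_zero_idx >= 0:
--         arr[non_zero_idx] = 0
--         non_zero_idx -= 1
--
--     return arr
-- ===== SOURCE B (Python) =====
-- def move_zeroes_to_start(arr):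
--     """Move all zeroes to start"""
--     nz = [x for x in arr if x != 0]
--     return [0] * (len(arr) - len(nz)) + nz
-- ===== Notes on version B (the rewrite author's own statement) =====
-- stated objective: simpler
-- what changed: Replaces the in-place backward two-pointer compaction plus zero-backfill while-loop with a single forward filter of the non-zeros and a counted zero prefix concatenation.
import Mathlib
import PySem

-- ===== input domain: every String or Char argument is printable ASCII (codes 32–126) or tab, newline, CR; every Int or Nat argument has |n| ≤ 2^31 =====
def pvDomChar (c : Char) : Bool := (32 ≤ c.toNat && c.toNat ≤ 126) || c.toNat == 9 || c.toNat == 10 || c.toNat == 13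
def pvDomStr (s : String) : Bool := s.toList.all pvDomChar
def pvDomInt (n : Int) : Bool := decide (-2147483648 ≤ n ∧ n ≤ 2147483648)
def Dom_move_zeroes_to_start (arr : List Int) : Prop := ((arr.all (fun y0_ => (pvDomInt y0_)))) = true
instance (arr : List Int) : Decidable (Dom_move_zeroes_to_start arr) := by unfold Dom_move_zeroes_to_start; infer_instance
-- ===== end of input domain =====

-- B replaces A's backward two-pointer compaction + zero-backfill while-loop by a
-- forward filter of the non-zeros with a counted zero prefix (simpler; return value only,
-- A does not mutate its argument since it copies it first).

-- ===== PORT A =====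
-- body of A's backward for-loop: state = (working list, non_zero_idx)
def mzBody (st : List Int × Int) (i : Int) : List Int × Int :=
  if PySem.List.pyGetD st.1 i 0 ≠ 0 then
    (st.1.set st.2.toNat (PySem.List.pyGetD st.1 i 0), st.2 - 1)
  else st

-- A's trailing 'while non_zero_idx >= 0' zero-backfill loop
def mzWhile (a : List Int) (nzi : Int) : List Int :=
  if nzi ≥ 0 then mzWhile (a.set nzi.toNat 0) (nzi - 1) else a
termination_by (nzi + 1).toNat
decreasing_by omega

def move_zeroes_to_start (arr : List Int) : List Int :=
  let n : Int := arr.length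
  let st := (PySem.List.pyRange (n - 1) (-1) (-1)).foldl mzBody (arr, n - 1)
  mzWhile st.1 st.2

-- ===== PORT B =====
def move_zeroes_to_start_alt (arr : List Int) : List Int :=
  let nz := arr.filter (fun x => x ≠ 0)
  List.replicate (arr.length - nz.length) 0 ++ nz

-- ===== PRECONDITION & SPEC =====
def Spec_move_zeroes_to_start (arr : List Int) (out : List Int) : Prop := out = move_zeroes_to_start_alt arr
instance (arr : List Int) (out : List Int) : Decidable (Spec_move_zeroes_to_start arr out) := by unfold Spec_move_zeroes_to_start; infer_instance

-- ===== CLAIM (what is proved, stated in full; the proofs are below) =====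
def Claim_equal_move_zeroes_to_start : Prop := ∀ (arr : List Int), Dom_move_zeroes_to_start arr → Spec_move_zeroes_to_start arr (move_zeroes_to_start arr)

-- ===== LEMMAS AND PROOFS =====

-- number of zeros in the part of arr not yet scanned by A's backward loop
def mzZ (arr : List Int) (k : Nat) : Nat := (arr.drop k).countP (fun x => decide (x = 0))
-- non-zeros of that part, in order
def mzF (arr : List Int) (k : Nat) : List Int := (arr.drop k).filter (fun x => decide (x ≠ 0))

-- invariant state of A's backward loop once indices ≥ k have been processed
def mzState (arr : List Int) (k : Nat) : List Int × Int :=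
  (arr.take (k + mzZ arr k) ++ mzF arr k, ((k + mzZ arr k : Nat) : Int) - 1)

theorem mzF_len_add_Z (l : List Int) :
    ∀ k, (mzF l k).length + mzZ l k = (l.drop k).length := by
  intro k
  unfold mzF mzZ
  induction l.drop k with
  | nil => simp
  | cons x xs ih =>
    simp only [List.filter_cons, List.countP_cons, List.length_cons]
    by_cases h : x = 0 <;> simp [h] at ih ⊢ <;> omega

theorem mzState_init (arr : List Int) :
    mzState arr arr.length = (arr, (arr.length : Int) - 1) := by
  simp [mzState, mzZ, mzF]

theorem mzBody_step (arr : List Int) (k : Nat) (hk : k < arr.length) :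
    mzBody (mzState arr (k + 1)) ((k : Nat) : Int) = mzState arr k := by
  have hdrop : arr.drop k = arr[k] :: arr.drop (k + 1) := List.drop_eq_getElem_cons hk
  have hzle : mzZ arr (k + 1) ≤ arr.length - (k + 1) := by
    have := mzF_len_add_Z arr (k + 1)
    simp at this; omega
  have hp : k + 1 + mzZ arr (k + 1) ≤ arr.length := by omega
  have hget : PySem.List.pyGetD (mzState arr (k + 1)).1 ((k : Nat) : Int) 0 = arr[k] := by
    have hlen : k < ((arr.take (k + 1 + mzZ arr (k + 1))).length) := by
      simp; omega
    simp only [mzState]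
    rw [PySem.List.pyGetD_natCast]
    rw [List.getD_eq_getElem?_getD, List.getElem?_append_left hlen]
    rw [List.getElem?_take]
    rw [if_pos (by omega), List.getElem?_eq_getElem hk]
    rfl
  by_cases h0 : arr[k] = 0
  · -- zero: state unchanged, counts shift
    have hZ : mzZ arr k = mzZ arr (k + 1) + 1 := by
      unfold mzZ; rw [hdrop, List.countP_cons]; simp [h0]
    have hF : mzF arr k = mzF arr (k + 1) := by
      unfold mzF; rw [hdrop, List.filter_cons]; simp [h0]
    have hnum : k + 1 + mzZ arr (k + 1) = k + mzZ arr k := by omega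
    unfold mzBody
    rw [hget, if_neg (by simp [h0])]
    unfold mzState
    rw [hF, ← hnum]
  · -- non-zero: write arr[k] at position p := k + mzZ (k+1), decrement pointer
    have hZ : mzZ arr k = mzZ arr (k + 1) := by
      unfold mzZ; rw [hdrop, List.countP_cons]; simp [h0]
    have hF : mzF arr k = arr[k] :: mzF arr (k + 1) := by
      unfold mzF; rw [hdrop, List.filter_cons]; simp [h0]
    unfold mzBody
    rw [hget, if_pos h0]
    unfold mzState
    set z := mzZ arr (k + 1) with hz
    have htn : (((k + 1 + z : Nat) : Int) - 1).toNat = k + z := by omega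
    rw [htn]
    have htake : arr.take (k + 1 + z) = arr.take (k + z) ++ [arr[k + z]] := by
      have : k + 1 + z = (k + z) + 1 := by omega
      rw [this, List.take_add_one, List.getElem?_eq_getElem (by omega)]
      simp
    rw [Prod.mk.injEq]
    refine ⟨?_, ?_⟩
    · rw [htake, hF, hZ, List.append_assoc, List.set_append]
      rw [if_neg (by simp)]
      have h00 : k + z - (arr.take (k + z)).length = 0 := by simp; omega
      rw [h00]
      simp
    · rw [hZ]; push_cast; ring

theorem mz_loop (arr : List Int) :
    ∀ k, k ≤ arr.length →
      (PySem.List.pyRange ((k : Nat) - 1 : Int) (-1) (-1)).foldl mzBody (mzState arr k)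
        = mzState arr 0 := by
  intro k
  induction k with
  | zero =>
    intro _
    rw [PySem.List.pyRange_neg_one_eq_nil (by norm_num)]
    simp
  | succ k ih =>
    intro hk
    have h1 : ((k + 1 : Nat) : Int) - 1 = (k : Nat) := by push_cast; ring
    rw [h1, PySem.List.pyRange_neg_one_cons (by omega)]
    rw [List.foldl_cons, mzBody_step arr k (by omega)]
    exact ih (by omega)

theorem mzWhile_eq : ∀ (m : Nat) (a : List Int), m ≤ a.length →
    mzWhile a ((m : Nat) - 1 : Int) = List.replicate m 0 ++ a.drop m := by
  intro m
  induction m with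
  | zero =>
    intro a _
    rw [mzWhile]
    norm_num
  | succ m ih =>
    intro a hm
    rw [mzWhile]
    have h0 : ((m + 1 : Nat) : Int) - 1 ≥ 0 := by omega
    rw [if_pos h0]
    have htn : (((m + 1 : Nat) : Int) - 1).toNat = m := by omega
    have h1 : ((m + 1 : Nat) : Int) - 1 - 1 = ((m : Nat) : Int) - 1 := by push_cast; ring
    rw [htn, h1, ih (a.set m 0) (by simp; omega)]
    have hmlt : m < a.length := by omega
    have hdrop : (a.set m 0).drop m = 0 :: a.drop (m + 1) := by
      rw [List.drop_set]
      simp only [lt_irrefl, if_false, Nat.sub_self]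
      rw [List.drop_eq_getElem_cons hmlt, List.set_cons_zero]
    rw [hdrop]
    simp [List.replicate_succ']

theorem move_eq (arr : List Int) :
    move_zeroes_to_start arr = move_zeroes_to_start_alt arr := by
  simp only [move_zeroes_to_start]
  rw [← mzState_init arr, mz_loop arr arr.length le_rfl]
  have hZle : mzZ arr 0 ≤ arr.length := by
    have := mzF_len_add_Z arr 0; simp at this; omega
  unfold mzState
  simp only [Nat.zero_add]
  have hlen : mzZ arr 0 ≤ (arr.take (mzZ arr 0) ++ mzF arr 0).length := by
    simp; omega
  rw [mzWhile_eq (mzZ arr 0) _ hlen]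
  have hdrop : (arr.take (mzZ arr 0) ++ mzF arr 0).drop (mzZ arr 0) = mzF arr 0 := by
    rw [List.drop_append_of_le_length (by simp; omega)]
    simp
  rw [hdrop]
  unfold move_zeroes_to_start_alt
  have hF : arr.filter (fun x => x ≠ 0) = mzF arr 0 := by
    simp [mzF]
  rw [hF]
  have := mzF_len_add_Z arr 0
  simp at this
  congr 1
  congr 1
  omega

-- ===== VERDICT (by name: the statement is the Claim_ definition above) =====
theorem move_zeroes_to_start_spec : Claim_equal_move_zeroes_to_start := by
  intro arr _
  unfold Spec_move_zeroes_to_start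
  exact (move_eq arr).symm ▸ rfl
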